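-- pv_equiv track=rewrite | github.com/ericka-cespedes/IntroProgrammingPY | 4.py | digitosAuxB
-- ===== SOURCE A (Python) =====
-- def digitosAuxB(dig, num):
--     if num==0:
--         return 0
--     else:
--         if num%10<=dig:
--             return num%10 + 10*(digitosAuxB(dig, num//10))
--         else:
--             return digitosAuxB(dig, num//10)
-- ===== SOURCE B (Python) =====
-- def digitosAuxB(dig, num):
--     # stage 1: extract the digits of num, least-significant first
--     digits = []
--     while num != 0:
--         digits.append(num % 10)
--         num //= 10
--     # stage 2: keep only digits <= dig
--     kept = [d for d in digits if d <= dig]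
--     # stage 3: rebuild the number, most-significant digit first
--     result = 0
--     for d in reversed(kept):
--         result = result * 10 + d
--     return result
-- ===== Notes on version B (the rewrite author's own statement) =====
-- stated objective: alternative
-- what changed: Replaces A's single interleaved recursion by three staged passes: extract the digit list least-significant-first, filter it with a comprehension, then rebuild the number with a Horner fold over the reversed kept digits.
import Mathlib
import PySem

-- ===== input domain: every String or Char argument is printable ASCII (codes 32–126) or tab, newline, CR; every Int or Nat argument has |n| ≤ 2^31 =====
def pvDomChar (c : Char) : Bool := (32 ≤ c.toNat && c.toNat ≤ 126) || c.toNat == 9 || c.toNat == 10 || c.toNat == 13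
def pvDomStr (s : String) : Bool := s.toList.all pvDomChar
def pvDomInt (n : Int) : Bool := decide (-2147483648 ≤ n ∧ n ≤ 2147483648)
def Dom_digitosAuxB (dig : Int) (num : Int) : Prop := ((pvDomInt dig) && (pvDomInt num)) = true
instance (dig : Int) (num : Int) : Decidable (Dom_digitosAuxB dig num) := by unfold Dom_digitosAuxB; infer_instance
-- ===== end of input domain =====

-- B replaces A's interleaved recursion by three staged passes (extract digits, filter,
-- Horner rebuild); objective: alternative, same cost. Same return value on all num ≥ 0
-- (on num < 0 the Python A raises RecursionError, excluded by Pre_).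

-- ===== PORT A =====
-- fuel-bounded transliteration of A's recursion; num.natAbs + 1 ≥ recursion depth for num ≥ 0
def digitosAuxBFuel : Nat → Int → Int → Int
  | 0, _, _ => 0
  | f + 1, dig, num =>
    if num = 0 then 0
    else
      if PySem.Int.mod num 10 ≤ dig then
        PySem.Int.mod num 10 + 10 * digitosAuxBFuel f dig (PySem.Int.floordiv num 10)
      else digitosAuxBFuel f dig (PySem.Int.floordiv num 10)

def digitosAuxB (dig : Int) (num : Int) : Int := digitosAuxBFuel (num.natAbs + 1) dig num

-- ===== PORT B =====
-- stage 1 of Source B: the digit-extraction while loop (fuel-bounded), least-significant first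
def digitsFuel : Nat → Int → List Int
  | 0, _ => []
  | f + 1, num =>
    if num = 0 then []
    else PySem.Int.mod num 10 :: digitsFuel f (PySem.Int.floordiv num 10)

def digitosAuxB_alt (dig : Int) (num : Int) : Int :=
  let digits := digitsFuel (num.natAbs + 1) num
  let kept := digits.filter (fun d => d ≤ dig)
  kept.reverse.foldl (fun result d => result * 10 + d) 0

-- ===== PRECONDITION & SPEC =====
-- Pre_ excludes num < 0, where the Python A raises RecursionError (num//10 never reaches 0).
def Pre_digitosAuxB (dig : Int) (num : Int) : Prop := 0 ≤ num
instance (dig : Int) (num : Int) : Decidable (Pre_digitosAuxB dig num) := by unfold Pre_digitosAuxB; infer_instance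
def pvWitness_digitosAuxB : Int × Int := (5, 2063)

def Spec_digitosAuxB (dig : Int) (num : Int) (out : Int) : Prop := out = digitosAuxB_alt dig num
instance (dig : Int) (num : Int) (out : Int) : Decidable (Spec_digitosAuxB dig num out) := by unfold Spec_digitosAuxB; infer_instance

-- ===== CLAIM (what is proved, stated in full; the proofs are below) =====
def Claim_equal_digitosAuxB : Prop := ∀ (dig : Int) (num : Int), Dom_digitosAuxB dig num → Pre_digitosAuxB dig num → Spec_digitosAuxB dig num (digitosAuxB dig num)

-- ===== LEMMAS AND PROOFS =====

-- the Horner rebuild of Source B's stage 3, as a function of the kept-digit list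
def pvRebuild (l : List Int) : Int := l.reverse.foldl (fun result d => result * 10 + d) 0

theorem pvRebuild_cons (d : Int) (l : List Int) : pvRebuild (d :: l) = d + 10 * pvRebuild l := by
  unfold pvRebuild
  rw [List.reverse_cons, List.foldl_append]
  simp only [List.foldl_cons, List.foldl_nil]
  ring

-- A's recursion equals the staged pipeline: rebuild of the filtered digit list, fuel for fuel
theorem fuel_eq_rebuild (f : Nat) : ∀ (dig num : Int),
    digitosAuxBFuel f dig num = pvRebuild ((digitsFuel f num).filter (fun d => d ≤ dig)) := by
  induction f with
  | zero => intro dig num; simp [digitosAuxBFuel, digitsFuel, pvRebuild]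
  | succ f ih =>
    intro dig num
    by_cases h0 : num = 0
    · simp [digitosAuxBFuel, digitsFuel, h0, pvRebuild]
    · simp only [digitosAuxBFuel, digitsFuel, if_neg h0]
      by_cases hd : PySem.Int.mod num 10 ≤ dig
      · rw [if_pos hd, List.filter_cons_of_pos (by simpa using hd), pvRebuild_cons, ih]
      · rw [if_neg hd, List.filter_cons_of_neg (by simpa using hd), ih]

-- ===== VERDICT (by name: the statement is the Claim_ definition above) =====
theorem digitosAuxB_spec : Claim_equal_digitosAuxB := by
  intro dig num _ _
  unfold Spec_digitosAuxB digitosAuxB digitosAuxB_alt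
  rw [fuel_eq_rebuild]
  rfl
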